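-- pv_equiv track=rewrite | github.com/VictorMartinezG/Parcial2 | Enfoque_Logica/059_Practica 59.py | induce_grammar
-- ===== SOURCE A (Python) =====
-- def induce_grammar(positive_examples):
--     # Intentamos encontrar un patrón común
--     prefix = ""
--     for example in positive_examples:
--         for i, char in enumerate(example):
--             if prefix == "" or example[:i+1] == prefix:
--                 prefix = example[:i+1]
--             else:
--                 break
--     return prefix
-- ===== SOURCE B (Python) =====
-- def induce_grammar(positive_examples):
--     # The original's inner loop can never keep a prefix longer than one
--     # character, so the result is the first character of the first
--     # non-empty example (or "" if there is none).
--     for example in positive_examples: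
--         if example:
--             return example[:1]
--     return ""
-- ===== Notes on version B (the rewrite author's own statement) =====
-- stated objective: simpler
-- what changed: Replaced the nested enumerate/slice loop (whose prefix can never grow past one character) by a single early-returning scan that yields the first character of the first non-empty example.
import Mathlib
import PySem

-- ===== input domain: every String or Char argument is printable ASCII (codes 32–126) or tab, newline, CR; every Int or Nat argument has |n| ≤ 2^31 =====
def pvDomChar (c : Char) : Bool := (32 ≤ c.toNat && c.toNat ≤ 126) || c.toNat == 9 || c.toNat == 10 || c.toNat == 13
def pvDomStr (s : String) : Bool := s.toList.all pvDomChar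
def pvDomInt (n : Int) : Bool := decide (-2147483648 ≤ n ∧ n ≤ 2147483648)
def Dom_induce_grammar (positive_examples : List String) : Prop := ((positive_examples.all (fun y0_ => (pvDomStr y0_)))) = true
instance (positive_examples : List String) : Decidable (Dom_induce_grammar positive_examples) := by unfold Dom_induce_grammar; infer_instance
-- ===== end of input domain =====

-- B replaces A's nested enumerate/slice loop (whose prefix can never exceed one
-- character) by a single early-returning scan: simpler, same result.


-- ===== PORT A =====
-- inner 'for i, char in enumerate(ex): …' loop with its break, over the
-- enumerate list, threading 'prefix'
def igInner (ex : String) : List (Int × Char) → String → String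
  | [], prefix_ => prefix_
  | (i, _) :: rest, prefix_ =>
      if prefix_ = "" ∨ PySem.Str.slice ex none (some (i + 1)) = prefix_ then
        igInner ex rest (PySem.Str.slice ex none (some (i + 1)))
      else prefix_

def induce_grammar (positive_examples : List String) : String :=
  positive_examples.foldl
    (fun prefix_ ex => igInner ex (PySem.List.enumerate ex.toList 0) prefix_) ""

-- ===== PORT B =====
def induce_grammar_alt : List String → String
  | [] => ""
  | ex :: rest =>
      if ex ≠ "" then PySem.Str.slice ex none (some 1)
      else induce_grammar_alt rest

-- ===== PRECONDITION & SPEC =====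
def Spec_induce_grammar (positive_examples : List String) (out : String) : Prop := out = induce_grammar_alt positive_examples
instance (positive_examples : List String) (out : String) : Decidable (Spec_induce_grammar positive_examples out) := by unfold Spec_induce_grammar; infer_instance

-- ===== CLAIM (what is proved, stated in full; the proofs are below) =====
def Claim_equal_induce_grammar : Prop := ∀ (positive_examples : List String), Dom_induce_grammar positive_examples → Spec_induce_grammar positive_examples (induce_grammar positive_examples)

-- ===== LEMMAS AND PROOFS =====

-- once the prefix is non-empty, the inner loop never changes it
lemma igInner_ne (ex : String) :
    ∀ (l : List (Int × Char)) (p : String), p ≠ "" → igInner ex l p = p := by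
  intro l
  induction l with
  | nil => intro p _; rfl
  | cons hd tl ih =>
      intro p hp
      obtain ⟨i, c⟩ := hd
      simp only [igInner]
      by_cases h : PySem.Str.slice ex none (some (i + 1)) = p
      · simp [hp, h, ih p hp]
      · simp [hp, h]

lemma slice_one_ne_empty (ex : String) (h : ex ≠ "") :
    PySem.Str.slice ex none (some 1) ≠ "" := by
  intro hc
  apply h
  have := congrArg String.toList hc
  rw [PySem.Str.toList_slice] at this
  simp only [PySem.Chars.slice_eq_listSlice] at this
  rw [show ((1 : Int)) = ((1 : Nat) : Int) by norm_num, PySem.List.slice_to_natCast] at this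
  have : ex.toList = [] := by
    cases hx : ex.toList with
    | nil => rfl
    | cons a as => rw [hx] at this; simp at this
  exact String.ext (by simp [this])

-- the inner loop starting from "" yields "" for an empty ex,
-- else the one-character slice ex[:1]
lemma igInner_empty (ex : String) :
    igInner ex (PySem.List.enumerate ex.toList 0) "" =
      if ex = "" then "" else PySem.Str.slice ex none (some 1) := by
  by_cases h : ex = ""
  · subst h; simp [igInner]
  · have hx : ex.toList ≠ [] := by
      intro hc; exact h (String.ext (by simp [hc]))
    cases hl : ex.toList with
    | nil => exact absurd hl hx
    | cons a as =>
        simp only [PySem.List.enumerate_cons]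
        simp only [igInner, zero_add]
        simp only [true_or, ite_true]
        rw [igInner_ne ex _ _ (slice_one_ne_empty ex h)]
        simp [h]

-- a non-empty accumulator passes through the whole fold unchanged
lemma foldl_ne (xs : List String) :
    ∀ p : String, p ≠ "" →
      xs.foldl (fun prefix_ ex =>
        igInner ex (PySem.List.enumerate ex.toList 0) prefix_) p = p := by
  induction xs with
  | nil => intro p _; rfl
  | cons x tl ih =>
      intro p hp
      simp only [List.foldl_cons]
      rw [igInner_ne x _ p hp]
      exact ih p hp

lemma main_eq (xs : List String) : induce_grammar xs = induce_grammar_alt xs := by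
  induction xs with
  | nil => rfl
  | cons x tl ih =>
      by_cases h : x = ""
      · subst h
        simp only [induce_grammar, List.foldl_cons, igInner_empty, induce_grammar_alt]
        simpa [induce_grammar] using ih
      · simp only [induce_grammar, List.foldl_cons, igInner_empty, if_neg h]
        rw [foldl_ne tl _ (slice_one_ne_empty x h)]
        simp [induce_grammar_alt, h]

-- ===== VERDICT (by name: the statement is the Claim_ definition above) =====
theorem induce_grammar_spec : Claim_equal_induce_grammar := by
  intro xs _
  unfold Spec_induce_grammar
  exact main_eq xs
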